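-- pv_equiv track=rewrite | github.com/DragunWF/Competitive-Programming | CodeWars/python/6_kyu/barrel_warehouse.py | insert_barrels
-- ===== SOURCE A (Python) =====
-- def insert_barrels(warehouse: list[str], barrels: list[str]) -> list[str]:
--     REQUIRED_SPACE = len(barrels)
--
--     if len(warehouse) == 1 and REQUIRED_SPACE == 1:
--         return ["0"]
--
--     min_found_space = None
--     min_space_indexes = {"start": None, "end": None}
--     space_indexes = {"start": None, "end": None}
--
--     for i, tile in enumerate(warehouse):
--         if tile == "0" and not space_indexes["start"] is None:
--             space_indexes["end"] = i
--             current_hole = space_indexes["end"] - space_indexes["start"]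
--
--             if current_hole >= REQUIRED_SPACE and (min_found_space is None or current_hole < min_found_space):
--                 min_found_space = current_hole
--                 min_space_indexes = space_indexes.copy()
--
--             space_indexes["start"] = None
--             space_indexes["end"] = None
--         elif not tile and space_indexes["start"] is None:
--             space_indexes["start"] = i
--
--     if not space_indexes["start"] is None:
--         end_index = len(warehouse) - 1
--         current_hole = (end_index + 1) - space_indexes["start"]
--         if current_hole >= REQUIRED_SPACE and (min_found_space is None or current_hole < min_found_space):
--             min_found_space = current_hole
--             min_space_indexes = {
--                 "start": space_indexes["start"], "end": end_index
--             }
--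
--     if min_found_space is None:
--         return warehouse
--
--     filled_barrels = 0
--     for i in range(min_space_indexes["start"], min_space_indexes["end"] + 1):
--         warehouse[i] = "0"
--         filled_barrels += 1
--         if filled_barrels == REQUIRED_SPACE:
--             break
--
--     return warehouse
-- ===== SOURCE B (Python) =====
-- def insert_barrels(warehouse: list[str], barrels: list[str]) -> list[str]:
--     need = len(barrels)
--
--     if len(warehouse) == 1 and need == 1:
--         return ["0"]
--
--     n = len(warehouse)
--     # Split the warehouse at the '0' tiles into segments; each segment
--     # contributes at most one gap, running from its first empty tile to
--     # the segment's end.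
--     zeros = [i for i, tile in enumerate(warehouse) if tile == "0"]
--     starts = [0] + [z + 1 for z in zeros]
--     ends = zeros + [n]
--     gaps = []
--     for lo, hi in zip(starts, ends):
--         for i in range(lo, hi):
--             if not warehouse[i]:
--                 gaps.append((i, hi - i))
--                 break
--
--     fitting = [g for g in gaps if g[1] >= need]
--     if not fitting:
--         return warehouse
--
--     start = min(fitting, key=lambda g: g[1])[0]
--     warehouse[start:start + need] = ["0"] * need
--     return warehouse
-- ===== Notes on version B (the rewrite author's own statement) =====
-- stated objective: alternative
-- what changed: Replaces A's single-pass option-state running-minimum scan and break-counting fill loop by a split-at-'0'-delimiters decomposition: compute the '0' positions, derive the segments between them, take each segment's first empty tile as its gap, pick the smallest fitting gap with min(key=length), and place the barrels with one slice assignment.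
-- intended difference: When barrels is empty and the warehouse contains an empty tile, A's fill loop (whose break counter can never reach 0) overwrites the entire smallest gap with '0', while B's empty slice assignment places the zero requested barrels and returns the warehouse unchanged, which is the intended behaviour for placing no barrels. — e.g. on insert_barrels([""], []): A returns ["0"], B returns [""]
import Mathlib
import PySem

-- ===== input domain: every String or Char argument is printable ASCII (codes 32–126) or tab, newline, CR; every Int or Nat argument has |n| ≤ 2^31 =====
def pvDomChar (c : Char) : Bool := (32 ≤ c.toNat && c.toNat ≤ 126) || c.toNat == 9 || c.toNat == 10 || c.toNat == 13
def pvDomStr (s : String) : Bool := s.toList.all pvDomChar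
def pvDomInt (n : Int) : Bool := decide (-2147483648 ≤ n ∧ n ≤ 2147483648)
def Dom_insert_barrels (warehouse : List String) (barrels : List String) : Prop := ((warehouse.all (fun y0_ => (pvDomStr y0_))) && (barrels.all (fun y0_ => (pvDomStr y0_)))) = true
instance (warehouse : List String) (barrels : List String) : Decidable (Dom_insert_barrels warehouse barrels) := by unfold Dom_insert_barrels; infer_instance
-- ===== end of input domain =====

-- B replaces A's one-pass running-minimum state machine by a split-at-'0'-delimiters decomposition
-- (zero positions -> segments -> per-segment first empty tile -> min by length -> one slice
-- assignment); in Python both mutate `warehouse` in place, the equivalence proved here is about the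
-- returned value, which is that same list.

-- ===== PORT A =====
-- A's fill loop: writes "0" at each index, counts, and breaks when the count reaches REQUIRED_SPACE.
def fillA (ws : List String) (idxs : List Int) (filled k : Int) : List String :=
  match idxs with
  | [] => ws
  | i :: rest =>
    let ws' := PySem.List.pySetD ws i "0"
    let filled' := filled + 1
    if filled' = k then ws' else fillA ws' rest filled' k

-- A's loop body; state = (min_found_space, (min start, min end), (start, end)): the two dicts as option pairs.
def stepA (k : Int) (st : Option Int × (Option Int × Option Int) × (Option Int × Option Int))
    (p : Int × String) : Option Int × (Option Int × Option Int) × (Option Int × Option Int) :=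
  let (mf, mIdx, sIdx) := st
  if p.2 = "0" ∧ sIdx.1 ≠ none then
    let se : Option Int := some p.1
    let hole := p.1 - sIdx.1.getD 0      -- start is known ≠ none in this branch; getD reads its value
    if hole ≥ k ∧ (mf = none ∨ hole < mf.getD 0) then
      (some hole, (sIdx.1, se), (none, none))
    else (mf, mIdx, (none, none))
  else if p.2 = "" ∧ sIdx.1 = none then  -- `not tile` on Dom strings means tile = ""
    (mf, mIdx, (some p.1, sIdx.2))
  else st

def insert_barrels (warehouse : List String) (barrels : List String) : List String :=
  let REQUIRED_SPACE := PySem.List.len barrels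
  if PySem.List.len warehouse = 1 ∧ REQUIRED_SPACE = 1 then ["0"]
  else
    let st := (PySem.List.enumerate warehouse 0).foldl (stepA REQUIRED_SPACE)
      (none, (none, none), (none, none))
    -- the trailing `if not space_indexes["start"] is None:` block; result = (min_found_space, min_space_indexes)
    let mfm : Option Int × (Option Int × Option Int) :=
      match st.2.2.1 with
      | some s =>
        let endIndex := PySem.List.len warehouse - 1
        let hole := (endIndex + 1) - s
        if hole ≥ REQUIRED_SPACE ∧ (st.1 = none ∨ hole < (st.1).getD 0) then
          (some hole, (some s, some endIndex))
        else (st.1, st.2.1)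
      | none => (st.1, st.2.1)
    match mfm.1 with
    | none => warehouse
    | some _ =>
      fillA warehouse (PySem.List.pyRange (mfm.2.1.getD 0) (mfm.2.2.getD 0 + 1) 1) 0 REQUIRED_SPACE

-- ===== PORT B =====
-- Source B's inner `for i in range(lo, hi): if not warehouse[i]: gaps.append((i, hi-i)); break` loop
-- (`not warehouse[i]` on strings is `warehouse[i] == ""`).
def findGap (w : List String) (hi : Int) : List Int → Option (Int × Int)
  | [] => none
  | i :: rest => if PySem.List.pyGet? w i = some "" then some (i, hi - i) else findGap w hi rest

def insert_barrels_alt (warehouse : List String) (barrels : List String) : List String :=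
  let need := PySem.List.len barrels
  if PySem.List.len warehouse = 1 ∧ need = 1 then ["0"]
  else
    let n := PySem.List.len warehouse
    let zeros := ((PySem.List.enumerate warehouse 0).filter (fun p => p.2 == "0")).map Prod.fst
    let starts := 0 :: zeros.map (· + 1)
    let ends := zeros ++ [n]
    let gaps := (starts.zip ends).foldl (fun acc p =>
      match findGap warehouse p.2 (PySem.List.pyRange p.1 p.2 1) with
      | some g => acc ++ [g]
      | none => acc) []
    let fitting := gaps.filter (fun g => decide (g.2 ≥ need))
    match PySem.List.min? fitting (fun g => g.2) with
    | none => warehouse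
    | some g =>
      -- warehouse[start:start+need] = ["0"]*need; exact as a take/replicate/drop because here
      -- 0 ≤ start and start+need ≤ n always hold
      warehouse.take g.1.toNat ++ List.replicate need.toNat "0" ++ warehouse.drop (g.1 + need).toNat

-- ===== PRECONDITION & SPEC =====
-- When barrels = [] and the warehouse has an empty tile, A's fill loop (whose break counter can
-- never reach 0) overwrites the whole smallest gap with "0"; B's empty slice assignment places the
-- zero requested barrels and returns the warehouse unchanged, which is the intended behaviour for
-- placing no barrels.
def D_insert_barrels (warehouse : List String) (barrels : List String) : Prop :=
  barrels = [] ∧ "" ∈ warehouse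
instance (warehouse : List String) (barrels : List String) : Decidable (D_insert_barrels warehouse barrels) := by unfold D_insert_barrels; infer_instance

def Spec_insert_barrels (warehouse : List String) (barrels : List String) (out : List String) : Prop := ¬ D_insert_barrels warehouse barrels → out = insert_barrels_alt warehouse barrels
instance (warehouse : List String) (barrels : List String) (out : List String) : Decidable (Spec_insert_barrels warehouse barrels out) := by unfold Spec_insert_barrels; infer_instance

def pvDiffWitness_insert_barrels : List String × List String := ([""], [])
def pvDiffWitnessOut_insert_barrels : (List String) × (List String) := (["0"], [""])

-- ===== CLAIM (what is proved, stated in full; the proofs are below) =====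
def Claim_unchanged_insert_barrels : Prop := ∀ (warehouse : List String) (barrels : List String), Dom_insert_barrels warehouse barrels → Spec_insert_barrels warehouse barrels (insert_barrels warehouse barrels)
def Claim_exact_insert_barrels : Prop := ∀ (warehouse : List String) (barrels : List String), Dom_insert_barrels warehouse barrels → D_insert_barrels warehouse barrels → insert_barrels warehouse barrels ≠ insert_barrels_alt warehouse barrels
def Claim_changed_insert_barrels : Prop := Dom_insert_barrels (pvDiffWitness_insert_barrels.1) (pvDiffWitness_insert_barrels.2) ∧ D_insert_barrels (pvDiffWitness_insert_barrels.1) (pvDiffWitness_insert_barrels.2) ∧ insert_barrels (pvDiffWitness_insert_barrels.1) (pvDiffWitness_insert_barrels.2) = pvDiffWitnessOut_insert_barrels.1 ∧ insert_barrels_alt (pvDiffWitness_insert_barrels.1) (pvDiffWitness_insert_barrels.2) = pvDiffWitnessOut_insert_barrels.2 ∧ pvDiffWitnessOut_insert_barrels.1 ≠ pvDiffWitnessOut_insert_barrels.2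

-- ===== LEMMAS AND PROOFS =====

-- proof-side reference scan: A's gap discovery restated as a left-to-right accumulator fold
def stepB (st : List (Int × Int) × Option Int) (p : Int × String) : List (Int × Int) × Option Int :=
  if p.2 = "0" then
    match st.2 with
    | some s => (st.1 ++ [(s, p.1 - s)], none)
    | none => st
  else if p.2 = "" ∧ st.2 = none then (st.1, some p.1)
  else st

-- and as a structural recursion producing the gap list directly
def gapsRec : Int → Option Int → List String → List (Int × Int)
  | i, op, [] => (match op with | some s => [(s, i - s)] | none => [])
  | i, op, x :: xs =>
    if x = "0" then
      match op with
      | some s => (s, i - s) :: gapsRec (i + 1) none xs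
      | none => gapsRec (i + 1) none xs
    else if x = "" ∧ op = none then gapsRec (i + 1) (some i) xs
    else gapsRec (i + 1) op xs

-- first empty tile (absolute index) of a segment
def feIdx : Int → List String → Option Int
  | _, [] => none
  | i, x :: xs => if x = "" then some i else feIdx (i + 1) xs

def zerosFrom : Int → List String → List Int
  | _, [] => []
  | i, x :: xs => if x = "0" then i :: zerosFrom (i + 1) xs else zerosFrom (i + 1) xs

def segsOf (i : Int) (l : List String) : List (Int × Int) :=
  (i :: (zerosFrom i l).map (· + 1)).zip (zerosFrom i l ++ [i + l.length])

def segFold (w : List String) (acc : List (Int × Int)) (segs : List (Int × Int)) : List (Int × Int) :=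
  segs.foldl (fun acc p =>
    match findGap w p.2 (PySem.List.pyRange p.1 p.2 1) with
    | some g => acc ++ [g]
    | none => acc) acc

-- running minimum used for the selection comparison
def selStep (k : Int) (best : Option (Int × Int)) (g : Int × Int) : Option (Int × Int) :=
  if g.2 ≥ k ∧ (best = none ∨ g.2 < (best.getD (0, 0)).2) then some g else best

def selectB (k : Int) (gaps : List (Int × Int)) : Option (Int × Int) :=
  gaps.foldl (selStep k) none

-- relation between A's running minimum (with its saved start/end indexes) and the selected gap
def MinRel (k : Int) (mf : Option Int) (mIdx : Option Int × Option Int) (best : Option (Int × Int)) : Prop :=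
  match best with
  | none => mf = none
  | some g => mf = some g.2 ∧ mIdx.1 = some g.1 ∧
      (∃ e, mIdx.2 = some e ∧ g.1 + g.2 - 1 ≤ e) ∧ k ≤ g.2

-- relation between A's full scan state and the reference scan's
def RelAB (k : Int) (a : Option Int × (Option Int × Option Int) × (Option Int × Option Int))
    (b : List (Int × Int) × Option Int) : Prop :=
  a.2.2.1 = b.2 ∧ MinRel k a.1 a.2.1 (selectB k b.1)

lemma selectB_append (k : Int) (gaps : List (Int × Int)) (g : Int × Int) :
    selectB k (gaps ++ [g]) = selStep k (selectB k gaps) g := by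
  simp [selectB, List.foldl_append]

lemma minrel_update (k : Int) (mf : Option Int) (mIdx : Option Int × Option Int)
    (best : Option (Int × Int)) (s hole e : Int)
    (h : MinRel k mf mIdx best) (he : s + hole - 1 ≤ e) :
    MinRel k (if hole ≥ k ∧ (mf = none ∨ hole < mf.getD 0) then some hole else mf)
      (if hole ≥ k ∧ (mf = none ∨ hole < mf.getD 0) then (some s, some e) else mIdx)
      (selStep k best (s, hole)) := by
  cases best with
  | none =>
    simp [MinRel] at h
    subst h
    by_cases hk : k ≤ hole
    · simp [MinRel, selStep, hk]; omega
    · simp [MinRel, selStep, hk]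
  | some g =>
    obtain ⟨hmf, hms, ⟨e', hme, hee⟩, hkg⟩ := h
    subst hmf
    simp only [MinRel, selStep]
    by_cases h1 : hole ≥ k ∧ (some g.2 = none ∨ hole < g.2)
    · simp only [Option.getD_some] at *
      rw [if_pos h1, if_pos (by simpa using h1), if_pos (by exact ⟨h1.1, Or.inr (by simpa using h1.2)⟩)]
      exact ⟨rfl, rfl, ⟨e, rfl, he⟩, h1.1⟩
    · simp only [Option.getD_some] at *
      rw [if_neg h1, if_neg (by simpa using h1), if_neg (by simpa using h1)]
      exact ⟨rfl, hms, ⟨e', hme, hee⟩, hkg⟩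

lemma step_rel (k : Int) (aSt : Option Int × (Option Int × Option Int) × (Option Int × Option Int))
    (bSt : List (Int × Int) × Option Int) (p : Int × String) (h : RelAB k aSt bSt) :
    RelAB k (stepA k aSt p) (stepB bSt p) := by
  obtain ⟨mf, mIdx, ss, se⟩ := aSt
  obtain ⟨gaps, bs⟩ := bSt
  obtain ⟨h1, h2⟩ := h
  simp only at h1
  subst h1
  by_cases hz : p.2 = "0"
  · cases hss : ss with
    | none => simpa [stepA, stepB, hz, hss, RelAB] using h2
    | some s =>
      have hA : stepA k (mf, mIdx, (some s, se)) p =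
          (if p.1 - s ≥ k ∧ (mf = none ∨ p.1 - s < mf.getD 0) then
            ((some (p.1 - s) : Option Int), ((some s : Option Int), (some p.1 : Option Int)), ((none : Option Int), (none : Option Int)))
          else (mf, mIdx, ((none : Option Int), (none : Option Int)))) := by
        simp [stepA, hz]
      constructor
      · rw [hA]
        simp [stepB, hz]
        split_ifs <;> rfl
      · rw [hA]
        simp only [stepB, hz, if_pos]
        simp only [selectB_append]
        have := minrel_update k mf mIdx (selectB k gaps) s (p.1 - s) p.1 h2 (by omega)
        split_ifs with hc
        · simpa [hc] using (by rw [if_pos hc] at this; rw [if_pos hc] at this; exact this)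
        · simpa [hc] using (by rw [if_neg hc] at this; rw [if_neg hc] at this; exact this)
  · by_cases he : p.2 = ""
    · cases hss : ss with
      | none => exact ⟨by simp [stepA, stepB, he], by simpa [stepA, stepB, he, RelAB] using h2⟩
      | some s => exact ⟨by simp [stepA, stepB, he], by simpa [stepA, stepB, he, RelAB] using h2⟩
    · exact ⟨by simp [stepA, stepB, hz, he], by simpa [stepA, stepB, hz, he, RelAB] using h2⟩

lemma scan_rel (k : Int) (l : List String) : ∀ (i : Int) aSt bSt, RelAB k aSt bSt →
    RelAB k (List.foldl (stepA k) aSt (PySem.List.enumerate l i))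
      (List.foldl stepB bSt (PySem.List.enumerate l i)) := by
  induction l with
  | nil => intro i aSt bSt h; simpa [PySem.List.enumerate_nil] using h
  | cons x xs ih =>
    intro i aSt bSt h
    rw [PySem.List.enumerate_cons]
    exact ih (i + 1) _ _ (step_rel k aSt bSt (i, x) h)

lemma scanA_noempty (k : Int) (l : List String) : ∀ (i : Int) mf mIdx se,
    (∀ x ∈ l, x ≠ "") →
    List.foldl (stepA k) (mf, mIdx, (none, se)) (PySem.List.enumerate l i) = (mf, mIdx, (none, se)) := by
  induction l with
  | nil => intro i mf mIdx se _; simp [PySem.List.enumerate_nil]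
  | cons x xs ih =>
    intro i mf mIdx se hne
    rw [PySem.List.enumerate_cons, List.foldl_cons]
    have hx : x ≠ "" := hne x (by simp)
    have : stepA k (mf, mIdx, (none, se)) (i, x) = (mf, mIdx, (none, se)) := by
      simp [stepA, hx]
    rw [this]
    exact ih (i + 1) mf mIdx se (fun y hy => hne y (by simp [hy]))

-- (1) the reference scan with its trailing-gap step equals gapsRec
lemma stepB_gapsRec (l : List String) : ∀ (i : Int) (acc : List (Int × Int)) (op : Option Int),
    (match (List.foldl stepB (acc, op) (PySem.List.enumerate l i)).2 with
     | some s => (List.foldl stepB (acc, op) (PySem.List.enumerate l i)).1 ++ [(s, (i + l.length) - s)]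
     | none => (List.foldl stepB (acc, op) (PySem.List.enumerate l i)).1)
    = acc ++ gapsRec i op l := by
  induction l with
  | nil =>
    intro i acc op
    cases op <;> simp [PySem.List.enumerate_nil, gapsRec]
  | cons x xs ih =>
    intro i acc op
    rw [PySem.List.enumerate_cons, List.foldl_cons]
    have harith : i + ((x :: xs).length : Int) = (i + 1) + (xs.length : Int) := by
      simp [List.length_cons]; ring
    rw [harith]
    by_cases hz : x = "0"
    · cases op with
      | none =>
        have : stepB (acc, none) (i, x) = (acc, none) := by simp [stepB, hz]
        rw [this, ih]
        simp [gapsRec, hz]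
      | some s =>
        have : stepB (acc, some s) (i, x) = (acc ++ [(s, i - s)], none) := by simp [stepB, hz]
        rw [this, ih]
        simp [gapsRec, hz]
    · by_cases he : x = ""
      · cases op with
        | none =>
          have : stepB (acc, none) (i, x) = (acc, some i) := by simp [stepB, he]
          rw [this, ih]
          simp [gapsRec, hz, he]
        | some s =>
          have : stepB (acc, some s) (i, x) = (acc, some s) := by simp [stepB, he]
          rw [this, ih]
          simp [gapsRec, hz, he]
      · have : stepB (acc, op) (i, x) = (acc, op) := by simp [stepB, hz, he]
        rw [this, ih]
        simp [gapsRec, hz, he]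

-- (2) zerosFrom is the port's enumerate-filter-map
lemma zeros_port (l : List String) : ∀ (i : Int),
    ((PySem.List.enumerate l i).filter (fun p => p.2 == "0")).map Prod.fst = zerosFrom i l := by
  induction l with
  | nil => intro i; simp [PySem.List.enumerate_nil, zerosFrom]
  | cons x xs ih =>
    intro i
    rw [PySem.List.enumerate_cons]
    by_cases hz : x = "0" <;> simp [zerosFrom, hz, List.filter_cons, ih]

lemma zerosFrom_nozero (l : List String) : ∀ (i : Int), "0" ∉ l → zerosFrom i l = [] := by
  induction l with
  | nil => intro i _; simp [zerosFrom]
  | cons x xs ih =>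
    intro i h
    have hx : x ≠ "0" := fun hc => h (by simp [hc])
    simp [zerosFrom, hx, ih (i + 1) (fun hc => h (by simp [hc]))]

lemma zerosFrom_split (u : List String) : ∀ (i : Int) (v : List String), "0" ∉ u →
    zerosFrom i (u ++ "0" :: v) = (i + u.length) :: zerosFrom (i + u.length + 1) v := by
  induction u with
  | nil => intro i v _; simp [zerosFrom]
  | cons x xs ih =>
    intro i v h
    have hx : x ≠ "0" := fun hc => h (by simp [hc])
    rw [List.cons_append]
    show zerosFrom i (x :: (xs ++ "0" :: v)) = _
    rw [show zerosFrom i (x :: (xs ++ "0" :: v)) = zerosFrom (i + 1) (xs ++ "0" :: v) by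
      simp [zerosFrom, hx]]
    rw [ih (i + 1) v (fun hc => h (by simp [hc]))]
    rw [show i + ((x :: xs).length : Int) = i + 1 + (xs.length : Int) by push_cast [List.length_cons]; ring]

lemma feIdx_findGap (u : List String) : ∀ (w : List String) (i hi : Int),
    (∀ j : Nat, j < u.length → PySem.List.pyGet? w (i + j) = u[j]?) →
    findGap w hi (PySem.List.pyRange i (i + u.length) 1)
      = (feIdx i u).map (fun s => (s, hi - s)) := by
  induction u with
  | nil =>
    intro w i hi _
    rw [show (i + (([] : List String).length : Int)) = i by simp,
        PySem.List.pyRange_one_eq_nil (le_refl i)]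
    simp [findGap, feIdx]
  | cons x xs ih =>
    intro w i hi hlink
    have h0 : PySem.List.pyGet? w i = some x := by
      have := hlink 0 (by simp)
      simpa using this
    rw [PySem.List.pyRange_one_cons (by push_cast [List.length_cons]; omega)]
    show (if PySem.List.pyGet? w i = some "" then some (i, hi - i)
          else findGap w hi (PySem.List.pyRange (i + 1) (i + ((x :: xs).length : Int)) 1)) = _
    by_cases hx : x = ""
    · rw [if_pos (by rw [h0, hx])]
      simp [feIdx, hx]
    · rw [if_neg (by rw [h0]; simp [hx])]
      rw [show (i + ((x :: xs).length : Int)) = (i + 1) + (xs.length : Int) by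
        push_cast [List.length_cons]; ring]
      rw [ih w (i + 1) hi (by
        intro j hj
        have := hlink (j + 1) (by simp; omega)
        rw [show i + ((j + 1 : Nat) : Int) = (i + 1) + (j : Int) by push_cast; ring] at this
        simpa using this)]
      simp [feIdx, hx]

lemma gapsRec_open_nozero (u : List String) : ∀ (j s : Int) (v : List String), "0" ∉ u →
    gapsRec j (some s) (u ++ "0" :: v) = (s, (j + u.length) - s) :: gapsRec (j + u.length + 1) none v := by
  induction u with
  | nil => intro j s v _; simp [gapsRec]
  | cons x xs ih =>
    intro j s v h
    have hx : x ≠ "0" := fun hc => h (by simp [hc])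
    rw [List.cons_append]
    rw [show gapsRec j (some s) (x :: (xs ++ "0" :: v)) = gapsRec (j + 1) (some s) (xs ++ "0" :: v) by
      simp [gapsRec, hx]]
    rw [ih (j + 1) s v (fun hc => h (by simp [hc]))]
    rw [show j + ((x :: xs).length : Int) = j + 1 + (xs.length : Int) by push_cast [List.length_cons]; ring]

lemma gapsRec_open_nozero_nil (u : List String) : ∀ (j s : Int), "0" ∉ u →
    gapsRec j (some s) u = [(s, (j + u.length) - s)] := by
  induction u with
  | nil => intro j s _; simp [gapsRec]
  | cons x xs ih =>
    intro j s h
    have hx : x ≠ "0" := fun hc => h (by simp [hc])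
    rw [show gapsRec j (some s) (x :: xs) = gapsRec (j + 1) (some s) xs by simp [gapsRec, hx]]
    rw [ih (j + 1) s (fun hc => h (by simp [hc]))]
    rw [show j + ((x :: xs).length : Int) = j + 1 + (xs.length : Int) by push_cast [List.length_cons]; ring]

lemma gapsRec_split (u : List String) : ∀ (i : Int) (v : List String), "0" ∉ u →
    gapsRec i none (u ++ "0" :: v)
      = (match feIdx i u with
         | some s => [(s, (i + u.length) - s)]
         | none => []) ++ gapsRec (i + u.length + 1) none v := by
  induction u with
  | nil => intro i v _; simp [gapsRec, feIdx]
  | cons x xs ih =>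
    intro i v h
    have hx : x ≠ "0" := fun hc => h (by simp [hc])
    rw [List.cons_append]
    by_cases he : x = ""
    · rw [show gapsRec i none (x :: (xs ++ "0" :: v)) = gapsRec (i + 1) (some i) (xs ++ "0" :: v) by
        simp [gapsRec, hx, he]]
      rw [gapsRec_open_nozero xs (i + 1) i v (fun hc => h (by simp [hc]))]
      rw [show i + ((x :: xs).length : Int) = i + 1 + (xs.length : Int) by push_cast [List.length_cons]; ring]
      simp [feIdx, he]
    · rw [show gapsRec i none (x :: (xs ++ "0" :: v)) = gapsRec (i + 1) none (xs ++ "0" :: v) by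
        simp [gapsRec, hx, he]]
      rw [ih (i + 1) v (fun hc => h (by simp [hc]))]
      rw [show feIdx i (x :: xs) = feIdx (i + 1) xs by simp [feIdx, he]]
      rw [show i + ((x :: xs).length : Int) = (i + 1) + (xs.length : Int) by
        push_cast [List.length_cons]; ring]

lemma gapsRec_nozero (u : List String) : ∀ (i : Int), "0" ∉ u →
    gapsRec i none u
      = (match feIdx i u with
         | some s => [(s, (i + u.length) - s)]
         | none => []) := by
  induction u with
  | nil => intro i _; simp [gapsRec, feIdx]
  | cons x xs ih =>
    intro i h
    have hx : x ≠ "0" := fun hc => h (by simp [hc])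
    by_cases he : x = ""
    · rw [show gapsRec i none (x :: xs) = gapsRec (i + 1) (some i) xs by simp [gapsRec, hx, he]]
      rw [gapsRec_open_nozero_nil xs (i + 1) i (fun hc => h (by simp [hc]))]
      rw [show i + ((x :: xs).length : Int) = i + 1 + (xs.length : Int) by push_cast [List.length_cons]; ring]
      simp [feIdx, he]
    · rw [show gapsRec i none (x :: xs) = gapsRec (i + 1) none xs by simp [gapsRec, hx, he]]
      rw [ih (i + 1) (fun hc => h (by simp [hc]))]
      rw [show feIdx i (x :: xs) = feIdx (i + 1) xs by simp [feIdx, he]]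
      rw [show i + ((x :: xs).length : Int) = (i + 1) + (xs.length : Int) by
        push_cast [List.length_cons]; ring]

lemma split_first_zero (l : List String) (h : "0" ∈ l) :
    ∃ u v, l = u ++ "0" :: v ∧ "0" ∉ u := by
  induction l with
  | nil => simp at h
  | cons x xs ih =>
    by_cases hx : x = "0"
    · exact ⟨[], xs, by simp [hx], by simp⟩
    · rcases List.mem_cons.mp h with h1 | h1
      · exact absurd h1.symm hx
      · obtain ⟨u, v, heq, hnu⟩ := ih h1
        refine ⟨x :: u, v, by simp [heq], ?_⟩
        intro hc
        rcases List.mem_cons.mp hc with h2 | h2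
        · exact hx h2.symm
        · exact hnu h2

-- (3) the segment fold of B equals gapsRec
lemma segFold_gapsRec (n : Nat) : ∀ (l : List String), l.length ≤ n →
    ∀ (w : List String) (i : Int) (acc : List (Int × Int)),
    (∀ j : Nat, j < l.length → PySem.List.pyGet? w (i + j) = l[j]?) →
    segFold w acc (segsOf i l) = acc ++ gapsRec i none l := by
  induction n with
  | zero =>
    intro l hl w i acc _
    have : l = [] := List.eq_nil_of_length_eq_zero (Nat.le_zero.mp hl)
    subst this
    rw [show segsOf i [] = [(i, i)] by simp [segsOf, zerosFrom]]
    simp [segFold, gapsRec, findGap, PySem.List.pyRange_one_eq_nil (le_refl i)]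
  | succ n ih =>
    intro l hl w i acc hlink
    by_cases hz : "0" ∈ l
    · obtain ⟨u, v, heq, hnu⟩ := split_first_zero l hz
      subst heq
      have hseg : segsOf i (u ++ "0" :: v) = (i, i + u.length) :: segsOf (i + u.length + 1) v := by
        unfold segsOf
        rw [zerosFrom_split u i v hnu]
        simp only [List.map_cons, List.cons_append, List.zip_cons_cons]
        congr 2
        congr 1
        push_cast [List.length_append, List.length_cons]; ring
      rw [hseg]
      have hlinku : ∀ j : Nat, j < u.length → PySem.List.pyGet? w (i + j) = u[j]? := by
        intro j hj
        rw [hlink j (by simp; omega)]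
        exact (List.getElem?_append_left hj)
      have hfg := feIdx_findGap u w i (i + u.length) hlinku
      have hstep : segFold w acc ((i, i + u.length) :: segsOf (i + u.length + 1) v)
          = segFold w (acc ++ (match feIdx i u with
              | some s => [(s, (i + u.length) - s)]
              | none => [])) (segsOf (i + u.length + 1) v) := by
        unfold segFold
        rw [List.foldl_cons]
        congr 1
        rw [hfg]
        cases feIdx i u <;> simp
      rw [hstep]
      have hlinkv : ∀ j : Nat, j < v.length → PySem.List.pyGet? w ((i + u.length + 1) + j) = v[j]? := by
        intro j hj
        have := hlink (u.length + 1 + j) (by simp; omega)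
        rw [show i + ((u.length + 1 + j : Nat) : Int) = (i + u.length + 1) + (j : Int) by
          push_cast; ring] at this
        rw [this]
        rw [List.getElem?_append_right (by omega)]
        simp [show u.length + 1 + j - u.length = j + 1 by omega]
      have hlen : v.length ≤ n := by
        have := hl
        simp [List.length_append, List.length_cons] at this
        omega
      rw [ih v hlen w (i + u.length + 1) _ hlinkv]
      rw [gapsRec_split u i v hnu]
      rw [List.append_assoc]
    · rw [show segsOf i l = [(i, i + l.length)] by
        simp [segsOf, zerosFrom_nozero l i hz]]
      unfold segFold
      rw [List.foldl_cons, List.foldl_nil]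
      rw [feIdx_findGap l w i (i + l.length) hlink]
      rw [gapsRec_nozero l i hz]
      cases feIdx i l <;> simp

-- (4) min? over the fitting gaps is the running selection
lemma minstep_eq_selStep (k : Int) (best : Option (Int × Int)) (g : Int × Int) (hk : g.2 ≥ k) :
    (match best with
     | none => some g
     | some m => if g.2 < m.2 then some g else some m) = selStep k best g := by
  cases best with
  | none => simp [selStep, hk]
  | some m =>
    show (if g.2 < m.2 then some g else some m) = _
    simp only [selStep]
    by_cases hlt : g.2 < m.2
    · rw [if_pos hlt, if_pos ⟨hk, Or.inr (by simpa using hlt)⟩]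
    · rw [if_neg hlt, if_neg (by simp [hk, hlt])]

lemma min?_filter_selectB (gaps : List (Int × Int)) (k : Int) : ∀ (best : Option (Int × Int)),
    List.foldl (fun acc g =>
      match acc with
      | none => some g
      | some m => if g.2 < m.2 then some g else some m)
      best (gaps.filter (fun g => decide (g.2 ≥ k)))
    = List.foldl (selStep k) best gaps := by
  induction gaps with
  | nil => intro best; simp
  | cons g gs ih =>
    intro best
    rw [List.filter_cons]
    by_cases hk : g.2 ≥ k
    · rw [if_pos (by simpa using hk), List.foldl_cons, List.foldl_cons,
        minstep_eq_selStep k best g hk]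
      exact ih (selStep k best g)
    · rw [if_neg (by simpa using hk), List.foldl_cons,
        show selStep k best g = best by simp [selStep, hk]]
      exact ih best

lemma min?_selectB (gaps : List (Int × Int)) (k : Int) :
    PySem.List.min? (gaps.filter (fun g => decide (g.2 ≥ k))) (fun g => g.2) = selectB k gaps := by
  simp only [PySem.List.min?, selectB]
  convert min?_filter_selectB gaps k none using 2
  funext a b
  cases a <;> rfl

-- (5) A's break-at-k fill over a long-enough range is a fill of exactly k tiles
lemma fill_eq (n : Nat) : ∀ (ws : List String) (a b c k : Int), k - c = (n : Int) → 1 ≤ n → a + n ≤ b →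
    fillA ws (PySem.List.pyRange a b 1) c k
      = (PySem.List.pyRange a (a + (n : Int)) 1).foldl (fun ws j => PySem.List.pySetD ws j "0") ws := by
  induction n with
  | zero => intro ws a b c k h h1; omega
  | succ m ih =>
    intro ws a b c k hkc _ hab
    rw [show PySem.List.pyRange a b 1 = a :: PySem.List.pyRange (a+1) b 1 from
          PySem.List.pyRange_one_cons (by push_cast at hab; omega),
        show PySem.List.pyRange a (a + ((m+1:Nat) : Int)) 1
            = a :: PySem.List.pyRange (a+1) (a + ((m+1:Nat):Int)) 1 from
          PySem.List.pyRange_one_cons (by push_cast; omega)]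
    simp only [List.foldl_cons]
    rw [fillA]
    by_cases hm : m = 0
    · subst hm
      have : c + 1 = k := by push_cast at hkc; omega
      rw [if_pos this]
      rw [PySem.List.pyRange_one_eq_nil (by push_cast; omega)]
      simp
    · rw [if_neg (by push_cast at hkc; omega)]
      have := ih (PySem.List.pySetD ws a "0") (a + 1) b (c + 1) k (by push_cast at hkc ⊢; omega)
        (by omega) (by push_cast at hab ⊢; omega)
      rw [this]
      congr 1
      push_cast
      ring_nf

-- (6) a fill of exactly m tiles is B's slice assignment
lemma setfold_slice (m : Nat) : ∀ (w : List String) (s : Int), 0 ≤ s → s.toNat + m ≤ w.length →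
    (PySem.List.pyRange s (s + (m : Int)) 1).foldl (fun ws j => PySem.List.pySetD ws j "0") w
      = w.take s.toNat ++ List.replicate m "0" ++ w.drop (s.toNat + m) := by
  induction m with
  | zero =>
    intro w s hs _
    rw [show s + ((0:Nat) : Int) = s by simp, PySem.List.pyRange_one_eq_nil (le_refl s)]
    simp [List.take_append_drop]
  | succ m ih =>
    intro w s hs hm
    rw [show PySem.List.pyRange s (s + ((m+1:Nat) : Int)) 1
          = s :: PySem.List.pyRange (s+1) (s + ((m+1:Nat):Int)) 1 from
        PySem.List.pyRange_one_cons (by push_cast; omega)]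
    rw [List.foldl_cons]
    have hset : PySem.List.pySetD w s "0" = w.set s.toNat "0" :=
      PySem.List.pySetD_of_nonneg w "0" hs
    rw [hset]
    have hlen : (w.set s.toNat "0").length = w.length := by simp
    have hrec := ih (w.set s.toNat "0") (s + 1) (by omega)
      (by simp only [List.length_set]; omega)
    rw [show s + ((m+1:Nat) : Int) = (s + 1) + ((m:Nat) : Int) by push_cast; ring]
    rw [hrec]
    have ht : (s + 1).toNat = s.toNat + 1 := by omega
    rw [ht]
    have hslt : s.toNat < w.length := by omega
    have htake : (w.set s.toNat "0").take (s.toNat + 1) = w.take s.toNat ++ ["0"] := by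
      rw [List.take_add_one, List.take_set,
        List.set_eq_of_length_le (by rw [List.length_take]; omega),
        List.getElem?_set_self (by omega)]
      simp
    have hdrop : List.drop (s.toNat + 1 + m) (w.set s.toNat "0") = List.drop (s.toNat + 1 + m) w := by
      rw [List.drop_set, if_pos (by omega)]
    rw [htake, hdrop]
    rw [show s.toNat + 1 + m = s.toNat + (m + 1) by omega]
    simp [List.replicate_succ]

-- goodness of discovered gaps: nonnegative in-range start at an empty tile, positive length, in-range end
def GoodGap (w : List String) (p : Int × Int) : Prop :=
  ∃ j : Nat, p.1 = (j : Int) ∧ j < w.length ∧ w[j]? = some "" ∧ 1 ≤ p.2 ∧ p.1 + p.2 ≤ (w.length : Int)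

def GoodSt (w : List String) (i : Int) (st : Option Int) : Prop :=
  ∀ s, st = some s → ∃ j : Nat, s = (j : Int) ∧ j < w.length ∧ w[j]? = some "" ∧ s < i

lemma scanB_good (w : List String) (l : List String) : ∀ (i : Int) (gaps : List (Int × Int)) (st : Option Int),
    (∀ p ∈ gaps, GoodGap w p) → GoodSt w i st →
    (∀ (j : Nat), j < l.length → ∃ jw : Nat, (jw : Int) = i + j ∧ jw < w.length ∧ w[jw]? = l[j]?) →
    (∀ p ∈ (List.foldl stepB (gaps, st) (PySem.List.enumerate l i)).1, GoodGap w p) ∧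
    GoodSt w (i + l.length) (List.foldl stepB (gaps, st) (PySem.List.enumerate l i)).2 := by
  induction l with
  | nil => intro i gaps st hg hst _; simp only [PySem.List.enumerate_nil, List.foldl_nil]
           exact ⟨hg, by simpa using hst⟩
  | cons x xs ih =>
    intro i gaps st hg hst hlink
    rw [PySem.List.enumerate_cons, List.foldl_cons]
    obtain ⟨jw, hjw, hjlt, hjval⟩ := hlink 0 (by simp)
    simp at hjw hjval
    have hlink' : ∀ (j : Nat), j < xs.length → ∃ jw : Nat, (jw : Int) = (i + 1) + j ∧ jw < w.length ∧ w[jw]? = xs[j]? := by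
      intro j hj
      obtain ⟨jw', h1, h2, h3⟩ := hlink (j + 1) (by simp; omega)
      exact ⟨jw', by push_cast at h1 ⊢; omega, h2, by simpa using h3⟩
    have harith : i + ((x :: xs).length : Int) = (i + 1) + (xs.length : Int) := by
      simp [List.length_cons]; ring
    by_cases hz : x = "0"
    · cases st with
      | none =>
        have hstep : stepB (gaps, none) (i, x) = (gaps, none) := by simp [stepB, hz]
        rw [hstep]
        have := ih (i + 1) gaps none hg (by intro s h; simp at h) hlink'
        exact ⟨this.1, by rw [harith]; exact this.2⟩
      | some s =>
        have hstep : stepB (gaps, some s) (i, x) = (gaps ++ [(s, i - s)], none) := by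
          simp [stepB, hz]
        rw [hstep]
        obtain ⟨j, hj1, hj2, hj3, hj4⟩ := hst s rfl
        have hg' : ∀ p ∈ gaps ++ [(s, i - s)], GoodGap w p := by
          intro p hp
          rcases List.mem_append.mp hp with h | h
          · exact hg p h
          · simp at h
            subst h
            exact ⟨j, hj1, hj2, hj3, by simp; omega, by simp; omega⟩
        have := ih (i + 1) (gaps ++ [(s, i - s)]) none hg' (by intro s' h; simp at h) hlink'
        exact ⟨this.1, by rw [harith]; exact this.2⟩
    · by_cases hxe : x = ""
      · cases st with
        | none =>
          have hstep : stepB (gaps, none) (i, x) = (gaps, some i) := by simp [stepB, hxe]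
          rw [hstep]
          have hst' : GoodSt w (i + 1) (some i) := by
            intro s hs
            simp at hs
            subst hxe
            exact ⟨jw, by omega, hjlt, by rw [hjval], by omega⟩
          have := ih (i + 1) gaps (some i) hg hst' hlink'
          exact ⟨this.1, by rw [harith]; exact this.2⟩
        | some s =>
          have hstep : stepB (gaps, some s) (i, x) = (gaps, some s) := by simp [stepB, hxe]
          rw [hstep]
          have hst' : GoodSt w (i + 1) (some s) := by
            intro s' hs'
            simp at hs'
            obtain ⟨j, h1, h2, h3, h4⟩ := hst s rfl
            exact ⟨j, by omega, h2, h3, by omega⟩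
          have := ih (i + 1) gaps (some s) hg hst' hlink'
          exact ⟨this.1, by rw [harith]; exact this.2⟩
      · have hstep : stepB (gaps, st) (i, x) = (gaps, st) := by simp [stepB, hz, hxe]
        rw [hstep]
        have hst' : GoodSt w (i + 1) st := by
          intro s hs
          obtain ⟨j, h1, h2, h3, h4⟩ := hst s hs
          exact ⟨j, h1, h2, h3, by omega⟩
        have := ih (i + 1) gaps st hg hst' hlink'
        exact ⟨this.1, by rw [harith]; exact this.2⟩

lemma selStep_isSome (k : Int) (best : Option (Int × Int)) (g : Int × Int)
    (h : best ≠ none) : selStep k best g ≠ none := by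
  unfold selStep
  split_ifs <;> simp [h]

lemma foldl_selStep_isSome (k : Int) (gaps : List (Int × Int)) : ∀ best, best ≠ none →
    List.foldl (selStep k) best gaps ≠ none := by
  induction gaps with
  | nil => intro best h; simpa using h
  | cons g gs ih => intro best h; exact ih (selStep k best g) (selStep_isSome k best g h)

lemma selectB_ne_none (k : Int) (gaps : List (Int × Int)) (g0 : Int × Int)
    (hmem : g0 ∈ gaps) (hk : k ≤ g0.2) : selectB k gaps ≠ none := by
  unfold selectB
  induction gaps with
  | nil => simp at hmem
  | cons g gs ih =>
    rw [List.foldl_cons]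
    rcases List.mem_cons.mp hmem with h | h
    · subst h
      exact foldl_selStep_isSome k gs (selStep k none g0) (by simp [selStep, hk])
    · cases hb : selStep k none g with
      | none => exact hb ▸ ih h
      | some b => exact foldl_selStep_isSome k gs (some b) (by simp)

lemma foldl_selStep_mem (k : Int) (gaps : List (Int × Int)) : ∀ best g,
    List.foldl (selStep k) best gaps = some g → g ∈ gaps ∨ best = some g := by
  induction gaps with
  | nil => intro best g h; simp at h; simp [h]
  | cons g0 gs ih =>
    intro best g h
    rw [List.foldl_cons] at h
    rcases ih (selStep k best g0) g h with h1 | h1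
    · exact Or.inl (List.mem_cons_of_mem _ h1)
    · unfold selStep at h1
      split_ifs at h1
      · simp at h1; simp [h1]
      · exact Or.inr h1

-- filling at indices strictly above j leaves position j unchanged
lemma fillA_getElem_lt (idxs : List Int) : ∀ (ws : List String) (c k : Int) (j : Nat),
    (∀ x ∈ idxs, (j : Int) < x) → (fillA ws idxs c k)[j]? = ws[j]? := by
  induction idxs with
  | nil => intro ws c k j _; rw [fillA]
  | cons i rest ih =>
    intro ws c k j hlt
    have hij : (j : Int) < i := hlt i (by simp)
    have hset : (PySem.List.pySetD ws i "0")[j]? = ws[j]? := by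
      rw [PySem.List.pySetD_of_nonneg ws "0" (by omega : (0:Int) ≤ i)]
      exact List.getElem?_set_ne (by omega)
    rw [fillA]
    split_ifs
    · exact hset
    · rw [ih (PySem.List.pySetD ws i "0") (c + 1) k j (fun x hx => hlt x (by simp [hx])), hset]

-- the head of A's fill range is set to "0" (for k = 0 the loop never breaks)
lemma fillA_head_zero (w : List String) (j : Nat) (e : Int)
    (hj : j < w.length) (hje : (j : Int) ≤ e) :
    (fillA w (PySem.List.pyRange (j : Int) (e + 1) 1) 0 0)[j]? = some "0" := by
  rw [show PySem.List.pyRange (j : Int) (e + 1) 1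
        = (j : Int) :: PySem.List.pyRange ((j : Int) + 1) (e + 1) 1 from
      PySem.List.pyRange_one_cons (by omega)]
  rw [fillA]
  simp only [if_neg (by omega : ¬((0:Int) + 1 = 0))]
  rw [fillA_getElem_lt _ _ _ _ j (by intro x hx; have := (PySem.List.mem_pyRange_one).mp hx; omega)]
  rw [PySem.List.pySetD_of_nonneg w "0" (by omega : (0:Int) ≤ (j:Int))]
  simp [hj]

-- the two programs' final fill-or-return steps
def finishA (k : Int) (w : List String) (mf : Option Int) (mIdx : Option Int × Option Int) : List String :=
  match mf with
  | none => w
  | some _ => fillA w (PySem.List.pyRange (mIdx.1.getD 0) (mIdx.2.getD 0 + 1) 1) 0 k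

def finishB (k : Int) (w : List String) (best : Option (Int × Int)) : List String :=
  match best with
  | none => w
  | some g => w.take g.1.toNat ++ List.replicate k.toNat "0" ++ w.drop (g.1 + k).toNat

-- given MinRel, goodness of the selected gap and k ≥ 1, A's final fill-or-return equals B's
lemma final_eq (k : Int) (w : List String) (mf : Option Int) (mIdx : Option Int × Option Int)
    (best : Option (Int × Int)) (h : MinRel k mf mIdx best) (hk : 1 ≤ k)
    (hgood : ∀ g, best = some g → 0 ≤ g.1 ∧ g.1 + g.2 ≤ (w.length : Int)) :
    finishA k w mf mIdx = finishB k w best := by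
  unfold finishA finishB
  cases best with
  | none => simp [MinRel] at h; simp [h]
  | some g =>
    obtain ⟨hmf, hms, ⟨e, hme, hee⟩, hkg⟩ := h
    obtain ⟨hg0, hgn⟩ := hgood g rfl
    subst hmf
    simp only [hms, hme, Option.getD_some]
    have hcast : ((k.toNat : Nat) : Int) = k := Int.toNat_of_nonneg (by omega)
    rw [fill_eq k.toNat w g.1 (e + 1) 0 k (by omega) (by omega) (by rw [hcast]; omega)]
    rw [setfold_slice k.toNat w g.1 hg0 (by omega)]
    rw [show g.1.toNat + k.toNat = (g.1 + k).toNat by omega]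

-- gaps are only appended to
lemma scanB_gaps_mono (l : List String) : ∀ (i : Int) (st : List (Int × Int) × Option Int),
    ∃ ext, (List.foldl stepB st (PySem.List.enumerate l i)).1 = st.1 ++ ext := by
  induction l with
  | nil => intro i st; exact ⟨[], by simp [PySem.List.enumerate_nil]⟩
  | cons x xs ih =>
    intro i st
    rw [PySem.List.enumerate_cons, List.foldl_cons]
    obtain ⟨ext, hext⟩ := ih (i + 1) (stepB st (i, x))
    have : (stepB st (i, x)).1 = st.1 ∨ ∃ g, (stepB st (i, x)).1 = st.1 ++ [g] := by
      by_cases hz : x = "0"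
      · cases hs : st.2 with
        | none => left; simp [stepB, hz, hs]
        | some s => right; exact ⟨(s, i - s), by simp [stepB, hz, hs]⟩
      · by_cases he : x = "" ∧ st.2 = none <;> simp [stepB, hz, he]
    rcases this with h | ⟨g, h⟩
    · exact ⟨ext, by rw [hext, h]⟩
    · exact ⟨[g] ++ ext, by rw [hext, h, List.append_assoc]⟩

-- an open gap that never closes keeps the gap list unchanged
lemma scanB_open (l : List String) : ∀ (i : Int) (gaps : List (Int × Int)) (s : Int),
    (List.foldl stepB (gaps, some s) (PySem.List.enumerate l i)).1 = gaps →
    (List.foldl stepB (gaps, some s) (PySem.List.enumerate l i)).2 = some s := by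
  induction l with
  | nil => intro i gaps s _; simp [PySem.List.enumerate_nil]
  | cons x xs ih =>
    intro i gaps s hg
    rw [PySem.List.enumerate_cons, List.foldl_cons] at hg ⊢
    by_cases hz : x = "0"
    · exfalso
      have hstep : stepB (gaps, some s) (i, x) = (gaps ++ [(s, i - s)], none) := by
        simp [stepB, hz]
      rw [hstep] at hg
      obtain ⟨ext, hext⟩ := scanB_gaps_mono xs (i + 1) (gaps ++ [(s, i - s)], none)
      rw [hext] at hg
      simp at hg
    · have hstep : stepB (gaps, some s) (i, x) = (gaps, some s) := by
        simp [stepB, hz]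
      rw [hstep] at hg ⊢
      exact ih (i + 1) gaps s hg

-- if the suffix contains an empty tile, the scan either closes a gap or leaves one open
lemma scanB_sees_empty (l : List String) : ∀ (i : Int) (gaps : List (Int × Int)) (st : Option Int),
    "" ∈ l →
    (List.foldl stepB (gaps, st) (PySem.List.enumerate l i)).1 ≠ gaps ∨
    (List.foldl stepB (gaps, st) (PySem.List.enumerate l i)).2 ≠ none := by
  induction l with
  | nil => intro i gaps st h; simp at h
  | cons x xs ih =>
    intro i gaps st hmem
    rw [PySem.List.enumerate_cons, List.foldl_cons]
    by_cases hxe : x = ""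
    · subst hxe
      cases hst : st with
      | none =>
        have hstep : stepB (gaps, none) (i, "") = (gaps, some i) := by simp [stepB]
        rw [hstep]
        by_cases hg : (List.foldl stepB (gaps, some i) (PySem.List.enumerate xs (i+1))).1 = gaps
        · exact Or.inr (by rw [scanB_open xs (i+1) gaps i hg]; simp)
        · exact Or.inl hg
      | some s =>
        have hstep : stepB (gaps, some s) (i, "") = (gaps, some s) := by simp [stepB]
        rw [hstep]
        by_cases hg : (List.foldl stepB (gaps, some s) (PySem.List.enumerate xs (i+1))).1 = gaps
        · exact Or.inr (by rw [scanB_open xs (i+1) gaps s hg]; simp)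
        · exact Or.inl hg
    · have hmem' : "" ∈ xs := by
        rcases List.mem_cons.mp hmem with h | h
        · exact absurd h.symm hxe
        · exact h
      by_cases hz : x = "0"
      · cases hst : st with
        | none =>
          have hstep : stepB (gaps, none) (i, x) = (gaps, none) := by simp [stepB, hz]
          rw [hstep]
          exact ih (i + 1) gaps none hmem'
        | some s =>
          have hstep : stepB (gaps, some s) (i, x) = (gaps ++ [(s, i - s)], none) := by
            simp [stepB, hz]
          rw [hstep]
          left
          obtain ⟨ext, hext⟩ := scanB_gaps_mono xs (i + 1) (gaps ++ [(s, i - s)], none)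
          rw [hext]
          intro hcon
          have := congrArg List.length hcon
          simp at this
      · have hstep : stepB (gaps, st) (i, x) = (gaps, st) := by simp [stepB, hz, hxe]
        rw [hstep]
        exact ih (i + 1) gaps st hmem'

-- if the minimum was found with barrels = [], A's fill changes the gap's first (empty) tile
lemma finish_ne (w : List String) (mf : Option Int) (mIdx : Option Int × Option Int)
    (gapsF : List (Int × Int)) (hmin : MinRel 0 mf mIdx (selectB 0 gapsF))
    (hgood : ∀ p ∈ gapsF, GoodGap w p) (g0 : Int × Int) (hg0 : g0 ∈ gapsF) :
    finishA 0 w mf mIdx ≠ w := by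
  have hq : 0 ≤ g0.2 := by obtain ⟨_, _, _, _, h, _⟩ := hgood g0 hg0; omega
  cases hbest : selectB 0 gapsF with
  | none => exact absurd hbest (selectB_ne_none 0 gapsF g0 hg0 hq)
  | some b =>
    have hbmem : b ∈ gapsF := by
      rcases foldl_selStep_mem 0 gapsF none b hbest with h | h
      · exact h
      · simp at h
    obtain ⟨j, hb1, hj2, hj3, hb2, _⟩ := hgood b hbmem
    rw [hbest] at hmin
    obtain ⟨hmf, hms, ⟨e, hme, hee⟩, -⟩ := hmin
    unfold finishA
    simp only [hmf, hms, hme, Option.getD_some]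
    intro hcon
    have hval := fillA_head_zero w j e hj2 (by omega)
    rw [hb1] at hcon
    have hidx := congrArg (fun l => l[j]?) hcon
    simp only at hidx
    rw [hval, hj3] at hidx
    simp at hidx

-- B's gap-list expression (as written in the port) equals the reference-scan gap list
lemma altB_gaps (w : List String) :
    ((0 :: (((PySem.List.enumerate w 0).filter (fun p => p.2 == "0")).map Prod.fst).map (· + 1)).zip
      ((((PySem.List.enumerate w 0).filter (fun p => p.2 == "0")).map Prod.fst) ++ [PySem.List.len w])).foldl
      (fun acc p =>
        match findGap w p.2 (PySem.List.pyRange p.1 p.2 1) with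
        | some g => acc ++ [g]
        | none => acc) []
    = (match (List.foldl stepB ([], none) (PySem.List.enumerate w 0)).2 with
       | some s => (List.foldl stepB ([], none) (PySem.List.enumerate w 0)).1 ++ [(s, ((0:Int) + w.length) - s)]
       | none => (List.foldl stepB ([], none) (PySem.List.enumerate w 0)).1) := by
  rw [stepB_gapsRec w 0 [] none]
  rw [zeros_port w 0]
  have hlen : PySem.List.len w = (0:Int) + (w.length : Int) := by simp [PySem.List.len_eq]
  have hseg : (0 :: (zerosFrom 0 w).map (· + 1)).zip ((zerosFrom 0 w) ++ [PySem.List.len w])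
      = segsOf 0 w := by
    unfold segsOf
    rw [hlen]
  rw [hseg]
  have := segFold_gapsRec w.length w (le_refl _) w 0 []
    (by intro j hj; rw [show (0:Int) + (j:Int) = ((j:Nat):Int) by omega]; simp)
  unfold segFold at this
  rw [this]

-- ===== VERDICT (by name: the statement is the Claim_ definition above) =====
-- the reference scan never opens a gap when no tile is empty
lemma scanB_noempty (l : List String) : ∀ (i : Int) gaps,
    (∀ x ∈ l, x ≠ "") →
    List.foldl stepB (gaps, none) (PySem.List.enumerate l i) = (gaps, none) := by
  induction l with
  | nil => intro i gaps _; simp [PySem.List.enumerate_nil]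
  | cons x xs ih =>
    intro i gaps hne
    rw [PySem.List.enumerate_cons, List.foldl_cons]
    have hx : x ≠ "" := hne x (by simp)
    have : stepB (gaps, none) (i, x) = (gaps, none) := by
      by_cases hz : x = "0" <;> simp [stepB, hz, hx]
    rw [this]
    exact ih (i + 1) gaps (fun y hy => hne y (by simp [hy]))

-- with no barrels B's empty slice assignment never changes the warehouse
lemma match_min_zero (w : List String) (o : Option (Int × Int)) :
    (match o with
     | none => w
     | some g => w.take g.1.toNat ++ List.replicate (0:Int).toNat "0" ++ w.drop (g.1 + 0).toNat) = w := by
  cases o with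
  | none => rfl
  | some g => simp [List.take_append_drop]

lemma altB_nil (w : List String) : insert_barrels_alt w [] = w := by
  simp only [insert_barrels_alt]
  rw [if_neg (by simp [PySem.List.len_eq] : ¬(PySem.List.len w = 1 ∧ PySem.List.len ([] : List String) = 1))]
  rw [show PySem.List.len ([] : List String) = 0 by simp [PySem.List.len_eq]]
  exact match_min_zero w _

-- ===== VERDICT (by name: the statement is the Claim_ definition above) =====
theorem insert_barrels_spec : Claim_unchanged_insert_barrels := by
  intro w bars _ hD
  by_cases hg : PySem.List.len w = 1 ∧ PySem.List.len bars = 1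
  · have hg' : w.length = 1 ∧ bars.length = 1 := by
      simpa [PySem.List.len_eq] using hg
    simp [insert_barrels, insert_barrels_alt, PySem.List.len_eq, hg'.1, hg'.2]
  · rcases bars with _ | ⟨b0, bt⟩
    · -- barrels = []: ¬D gives "" ∉ w, neither side finds a gap, both return w
      have hne : ∀ x ∈ w, x ≠ "" := by
        intro x hx hxe
        exact hD ⟨rfl, hxe ▸ hx⟩
      simp only [insert_barrels, insert_barrels_alt]
      rw [if_neg hg, if_neg hg,
          scanA_noempty (PySem.List.len ([] : List String)) w 0 none (none, none) none hne,
          altB_gaps w, scanB_noempty w 0 [] hne]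
      simp [PySem.List.min?]
    · -- barrels nonempty: k ≥ 1; the scan invariant plus the trailing-gap step and the fill lemmas
      set k := PySem.List.len (b0 :: bt) with hkdef
      have hk1 : 1 ≤ k := by simp only [hkdef, PySem.List.len_eq, List.length_cons]; omega
      simp only [insert_barrels, insert_barrels_alt]
      rw [if_neg hg, if_neg hg, ← hkdef]
      rw [altB_gaps w, min?_selectB]
      have hrel := scan_rel k w 0 (none, (none, none), (none, none)) ([], none)
        ⟨rfl, by simp [MinRel, selectB]⟩
      set aF := List.foldl (stepA k) (none, (none, none), (none, none)) (PySem.List.enumerate w 0) with haF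
      set bF := List.foldl stepB ([], none) (PySem.List.enumerate w 0) with hbF
      obtain ⟨hss, hmin⟩ := hrel
      have hgoodB := scanB_good w w 0 [] none (by intro p hp; simp at hp)
        (by intro s h; simp at h) (by intro j hj; exact ⟨j, by simp, hj, rfl⟩)
      rw [← hbF] at hgoodB
      have hlen0 : ((0:Int) + (w.length : Int)) = PySem.List.len w := by simp [PySem.List.len_eq]
      cases hsF : aF.2.2.1 with
      | none =>
        rw [hsF] at hss
        rw [← hss]
        have hgood : ∀ g, selectB k bF.1 = some g → 0 ≤ g.1 ∧ g.1 + g.2 ≤ (w.length : Int) := by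
          intro g hgsel
          have hgsel' : List.foldl (selStep k) none bF.1 = some g := hgsel
          have hmem : g ∈ bF.1 := by
            rcases foldl_selStep_mem k bF.1 none g hgsel' with h | h
            · exact h
            · simp at h
          obtain ⟨j, h1, h2, h3, h4, h5⟩ := hgoodB.1 g hmem
          exact ⟨by omega, h5⟩
        exact final_eq k w aF.1 aF.2.1 (selectB k bF.1) hmin hk1 hgood
      | some s =>
        rw [hsF] at hss
        rw [← hss]
        rw [hlen0]
        simp only [selectB_append]
        have hupd := minrel_update k aF.1 aF.2.1 (selectB k bF.1) s (PySem.List.len w - s)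
          (PySem.List.len w - 1) hmin (by omega)
        have harith : (PySem.List.len w - 1 + 1) - s = PySem.List.len w - s := by ring
        rw [harith]
        have hgoodApp : ∀ g, selStep k (selectB k bF.1) (s, PySem.List.len w - s) = some g →
            0 ≤ g.1 ∧ g.1 + g.2 ≤ (w.length : Int) := by
          intro g hgsel
          rw [← selectB_append] at hgsel
          have hgsel' : List.foldl (selStep k) none (bF.1 ++ [(s, PySem.List.len w - s)]) = some g := hgsel
          have hmem : g ∈ bF.1 ++ [(s, PySem.List.len w - s)] := by
            rcases foldl_selStep_mem k _ none g hgsel' with h | h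
            · exact h
            · simp at h
          rcases List.mem_append.mp hmem with h | h
          · obtain ⟨j, h1, h2, h3, h4, h5⟩ := hgoodB.1 g h
            exact ⟨by omega, h5⟩
          · simp at h
            obtain ⟨j, hj1, hj2, hj3, hj4⟩ := hgoodB.2 s hss.symm
            subst h
            exact ⟨show (0:Int) ≤ s by omega,
              show s + (((w.length : Int)) - s) ≤ (w.length : Int) by omega⟩
        by_cases hc : PySem.List.len w - s ≥ k ∧ (aF.1 = none ∨ PySem.List.len w - s < (aF.1).getD 0)
        · rw [if_pos hc] at hupd ⊢
          rw [if_pos hc] at hupd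
          exact final_eq k w _ _ _ hupd hk1 hgoodApp
        · rw [if_neg hc] at hupd ⊢
          rw [if_neg hc] at hupd
          exact final_eq k w _ _ _ hupd hk1 hgoodApp

theorem insert_barrels_changed : Claim_changed_insert_barrels := by
  unfold Claim_changed_insert_barrels; decide

theorem insert_barrels_tight : Claim_exact_insert_barrels := by
  intro w bars _ hD
  obtain ⟨hb, hw⟩ := hD
  subst hb
  rw [altB_nil w]
  simp only [insert_barrels]
  rw [if_neg (by simp [PySem.List.len_eq] : ¬(PySem.List.len w = 1 ∧ PySem.List.len ([] : List String) = 1))]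
  have hk0 : PySem.List.len ([] : List String) = 0 := by simp [PySem.List.len_eq]
  rw [hk0]
  have hrel := scan_rel 0 w 0 (none, (none, none), (none, none)) ([], none)
    ⟨rfl, by simp [MinRel, selectB]⟩
  set aF := List.foldl (stepA 0) (none, (none, none), (none, none)) (PySem.List.enumerate w 0) with haF
  set bF := List.foldl stepB ([], none) (PySem.List.enumerate w 0) with hbF
  obtain ⟨hss, hmin⟩ := hrel
  have hgood := scanB_good w w 0 [] none (by intro p hp; simp at hp)
    (by intro s h; simp at h) (by intro j hj; exact ⟨j, by simp, hj, rfl⟩)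
  rw [← hbF] at hgood
  have hne := scanB_sees_empty w 0 [] none hw
  rw [← hbF] at hne
  cases hsF : aF.2.2.1 with
  | none =>
    rw [hsF] at hss
    have hbne : bF.1 ≠ [] := by
      rcases hne with h | h
      · exact h
      · exact absurd hss.symm h
    obtain ⟨g0, gs, hcons⟩ := List.exists_cons_of_ne_nil hbne
    have hg0 : g0 ∈ bF.1 := by rw [hcons]; simp
    exact finish_ne w aF.1 aF.2.1 bF.1 hmin hgood.1 g0 hg0
  | some s =>
    rw [hsF] at hss
    obtain ⟨j, hj1, hj2, hj3, hj4⟩ := hgood.2 s hss.symm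
    have hgood' : ∀ p ∈ bF.1 ++ [(s, PySem.List.len w - s)], GoodGap w p := by
      intro p hp
      rcases List.mem_append.mp hp with h | h
      · exact hgood.1 p h
      · simp at h
        subst h
        refine ⟨j, hj1, hj2, hj3, ?_, ?_⟩
        · omega
        · omega
    have hg0 : (s, PySem.List.len w - s) ∈ bF.1 ++ [(s, PySem.List.len w - s)] := by simp
    simp only []
    rw [show (PySem.List.len w - 1 + 1) - s = PySem.List.len w - s by ring]
    have hupd := minrel_update 0 aF.1 aF.2.1 (selectB 0 bF.1) s (PySem.List.len w - s)
      (PySem.List.len w - 1) hmin (by omega)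
    rw [← selectB_append] at hupd
    by_cases hc : PySem.List.len w - s ≥ 0 ∧ (aF.1 = none ∨ PySem.List.len w - s < (aF.1).getD 0)
    · rw [if_pos hc] at hupd ⊢
      rw [if_pos hc] at hupd
      exact finish_ne w _ _ _ hupd hgood' _ hg0
    · rw [if_neg hc] at hupd ⊢
      rw [if_neg hc] at hupd
      exact finish_ne w _ _ _ hupd hgood' _ hg0
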